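-- pv_equiv track=rewrite | github.com/kengiroy2-g/kenobase | scripts/validate_zehnergruppen.py | filter_by_decade
-- ===== SOURCE A (Python) =====
-- def filter_by_decade(numbers: list[int], max_per_decade: int) -> list[int]:
--     """Filtert Zahlen nach Dekaden-Regel.
--
--     Die Regel: Max max_per_decade Zahlen pro Dekade.
--     Dekaden: 1-10=0, 11-20=1, 21-30=2, etc.
--     Formel: decade = (number - 1) // 10
--
--     Args:
--         numbers: Liste der Zahlen
--         max_per_decade: Max Zahlen pro Dekade
--
--     Returns:
--         Gefilterte Liste (erste max_per_decade Zahlen pro Dekade)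
--     """
--     decade_counts: dict[int, int] = {}
--     result = []
--
--     for num in sorted(numbers):
--         decade = (num - 1) // 10
--         current_count = decade_counts.get(decade, 0)
--         if current_count < max_per_decade:
--             result.append(num)
--             decade_counts[decade] = current_count + 1
--
--     return result
-- ===== SOURCE B (Python) =====
-- def filter_by_decade(numbers: list[int], max_per_decade: int) -> list[int]:
--     """Bucket by decade in one pass, then emit each decade's smallest max_per_decade numbers in decade order."""
--     if max_per_decade <= 0:
--         return []
--     buckets: dict[int, list[int]] = {}
--     for num in numbers:
--         buckets.setdefault((num - 1) // 10, []).append(num)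
--     result: list[int] = []
--     for d in sorted(buckets):
--         result.extend(sorted(buckets[d])[:max_per_decade])
--     return result
-- ===== Notes on version B (the rewrite author's own statement) =====
-- stated objective: alternative
-- what changed: Instead of sorting the whole input and counting per decade with a dict during one filtered sweep, B buckets the numbers by decade in one unsorted pass, then walks the decade keys in ascending order, sorting each bucket and emitting its first max_per_decade elements.
import Mathlib
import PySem

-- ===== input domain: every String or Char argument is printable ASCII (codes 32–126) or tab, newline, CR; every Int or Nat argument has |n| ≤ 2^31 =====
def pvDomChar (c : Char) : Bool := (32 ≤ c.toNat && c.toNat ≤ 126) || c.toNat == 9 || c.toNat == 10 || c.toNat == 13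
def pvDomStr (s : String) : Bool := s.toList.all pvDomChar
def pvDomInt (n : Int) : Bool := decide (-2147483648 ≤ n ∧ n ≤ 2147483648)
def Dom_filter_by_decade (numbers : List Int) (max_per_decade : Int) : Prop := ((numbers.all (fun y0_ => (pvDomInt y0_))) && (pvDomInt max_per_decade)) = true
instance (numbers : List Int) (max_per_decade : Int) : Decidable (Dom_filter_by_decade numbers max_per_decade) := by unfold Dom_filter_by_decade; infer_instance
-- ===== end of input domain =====

-- B buckets by decade in one unsorted pass, then emits each decade's sorted bucket truncated to
-- max_per_decade in ascending decade order; A sorts everything and counts per decade in one sweep.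

-- decade = (num - 1) // 10   (shared transliteration of the same Python expression in A and B)
def pvDecade (num : Int) : Int := PySem.Int.floordiv (num - 1) 10

-- ===== PORT A =====
-- loop body of A: current_count = decade_counts.get(decade, 0); if < max: append, bump count
def pvStepA (max_per_decade : Int) (st : PySem.Dict Int Int × List Int) (num : Int) :
    PySem.Dict Int Int × List Int :=
  let decade := pvDecade num
  let current_count := st.1.getD decade 0
  if current_count < max_per_decade then
    (st.1.insert decade (current_count + 1), st.2 ++ [num])
  else st

def filter_by_decade (numbers : List Int) (max_per_decade : Int) : List Int :=
  ((PySem.List.sorted numbers (fun x => x) false).foldl (pvStepA max_per_decade)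
    (PySem.Dict.empty, [])).2

-- ===== PORT B =====
def filter_by_decade_alt (numbers : List Int) (max_per_decade : Int) : List Int :=
  if max_per_decade ≤ 0 then []
  else
    -- buckets.setdefault(decade, []).append(num)  ≡  buckets[decade] = buckets.get(decade, []) + [num]
    let buckets := numbers.foldl
      (fun (d : PySem.Dict Int (List Int)) num => d.modify (pvDecade num) [] (· ++ [num]))
      PySem.Dict.empty
    (PySem.List.sorted buckets.keys (fun k => k) false).foldl
      (fun result d =>
        result ++ PySem.List.slice
          (PySem.List.sorted (buckets.getD d []) (fun x => x) false) none (some max_per_decade))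
      []

-- ===== PRECONDITION & SPEC =====
def Spec_filter_by_decade (numbers : List Int) (max_per_decade : Int) (out : List Int) : Prop := out = filter_by_decade_alt numbers max_per_decade
instance (numbers : List Int) (max_per_decade : Int) (out : List Int) : Decidable (Spec_filter_by_decade numbers max_per_decade out) := by unfold Spec_filter_by_decade; infer_instance

-- ===== CLAIM (what is proved, stated in full; the proofs are below) =====
def Claim_equal_filter_by_decade : Prop := ∀ (numbers : List Int) (max_per_decade : Int), Dom_filter_by_decade numbers max_per_decade → Spec_filter_by_decade numbers max_per_decade (filter_by_decade numbers max_per_decade)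

-- ===== LEMMAS AND PROOFS =====

lemma pvDecade_mono {a b : Int} (h : a ≤ b) : pvDecade a ≤ pvDecade b := by
  unfold pvDecade
  rw [PySem.Int.floordiv_eq_ediv_of_pos (by norm_num), PySem.Int.floordiv_eq_ediv_of_pos (by norm_num)]
  exact Int.ediv_le_ediv (by norm_num) (by omega)

lemma le_of_pvDecade_lt {a b : Int} (h : pvDecade a < pvDecade b) : a ≤ b := by
  by_contra hab
  have := pvDecade_mono (le_of_lt (lt_of_not_ge hab))
  omega

-- the bucket dict's entry at c is the filter of the input at decade c
lemma getD_bucketFold (l : List Int) (d : PySem.Dict Int (List Int)) (c : Int) :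
    (l.foldl (fun d num => d.modify (pvDecade num) [] (· ++ [num])) d).getD c []
      = d.getD c [] ++ l.filter (fun num => pvDecade num == c) := by
  induction l generalizing d with
  | nil => simp
  | cons x t ih =>
    simp only [List.foldl_cons, List.filter_cons]
    rw [ih, PySem.Dict.getD_modify]
    by_cases h : pvDecade x = c
    · simp [h]
    · simp [h, Ne.symm h]

-- distinct keys covering l: concatenating the per-key filters permutes l
lemma flatMap_filter_perm (key : Int → Int) (K : List Int) (l : List Int)
    (hK : K.Nodup) (hall : ∀ x ∈ l, key x ∈ K) :
    (K.flatMap (fun k => l.filter (fun x => key x == k))).Perm l := by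
  induction K generalizing l with
  | nil =>
    have : l = [] := List.eq_nil_iff_forall_not_mem.2 (fun x hx => by simpa using hall x hx)
    simp [this]
  | cons k K' ih =>
    simp only [List.flatMap_cons]
    have htail : K'.flatMap (fun k' => l.filter (fun x => key x == k'))
        = K'.flatMap (fun k' => (l.filter (fun x => !(key x == k))).filter (fun x => key x == k')) := by
      apply List.flatMap_congr
      intro k' hk'
      rw [List.filter_filter]
      apply List.filter_congr
      intro x hx
      by_cases hxk' : key x = k'
      · have : k' ≠ k := fun e => (List.nodup_cons.1 hK).1 (e ▸ hk')
        simp [hxk', this]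
      · simp [hxk']
    rw [htail]
    have hperm := ih (l.filter (fun x => !(key x == k))) (List.nodup_cons.1 hK).2
      (fun x hx => by
        have hx' := List.mem_filter.1 hx
        rcases List.mem_cons.1 (hall x hx'.1) with h | h
        · exact absurd (by simpa using h) (by simpa using hx'.2)
        · exact h)
    exact (hperm.append_left _).trans (List.filter_append_perm _ l)

-- A's loop does nothing when max_per_decade ≤ 0 and all stored counts are nonnegative
lemma foldA_nonpos (m : Int) (hm : m ≤ 0) (l : List Int) (d : PySem.Dict Int Int) (r : List Int)
    (hd : ∀ k, 0 ≤ d.getD k 0) :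
    l.foldl (pvStepA m) (d, r) = (d, r) := by
  induction l with
  | nil => rfl
  | cons x t ih =>
    have : pvStepA m (d, r) x = (d, r) := by
      unfold pvStepA
      simp only
      rw [if_neg (by have := hd (pvDecade x); omega)]
    rw [List.foldl_cons, this, ih]

-- A's loop over a single-decade run: appends the first (m - c) elements, other counts untouched
lemma foldA_block (m : Int) (k : Int) (l : List Int)
    (hl : ∀ x ∈ l, pvDecade x = k) (d : PySem.Dict Int Int) (r : List Int) (c : Int)
    (hc : d.getD k 0 = c) :
    ∃ d', l.foldl (pvStepA m) (d, r) = (d', r ++ l.take (m - c).toNat)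
      ∧ (∀ k', k' ≠ k → d'.getD k' 0 = d.getD k' 0) := by
  induction l generalizing d r c with
  | nil => exact ⟨d, by simp, fun _ _ => rfl⟩
  | cons x t ih =>
    have hxk : pvDecade x = k := hl x List.mem_cons_self
    by_cases hlt : c < m
    · have hstep : pvStepA m (d, r) x = (d.insert k (c + 1), r ++ [x]) := by
        unfold pvStepA; simp only [hxk, hc, if_pos hlt]
      obtain ⟨d', hd', hpres⟩ := ih (fun y hy => hl y (List.mem_cons_of_mem _ hy))
        (d.insert k (c + 1)) (r ++ [x]) (c + 1) (by simp [PySem.Dict.getD_insert_self])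
      refine ⟨d', ?_, fun k' hk' => by
        rw [hpres k' hk', PySem.Dict.getD_insert, if_neg hk']⟩
      rw [List.foldl_cons, hstep, hd']
      have htn : (m - c).toNat = (m - (c + 1)).toNat + 1 := by omega
      rw [htn, List.take_succ_cons, List.append_assoc]
      rfl
    · have hstep : pvStepA m (d, r) x = (d, r) := by
        unfold pvStepA; simp only [hxk, hc, if_neg hlt]
      obtain ⟨d', hd', hpres⟩ := ih (fun y hy => hl y (List.mem_cons_of_mem _ hy)) d r c hc
      refine ⟨d', ?_, hpres⟩
      rw [List.foldl_cons, hstep, hd']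
      have htn : (m - c).toNat = 0 := by omega
      simp [htn]

-- A's loop over decade-grouped input keeps the first m of each group
lemma foldA_flatMap (m : Int) (K : List Int) (f : Int → List Int)
    (hf : ∀ k ∈ K, ∀ x ∈ f k, pvDecade x = k) (hK : K.Nodup)
    (d : PySem.Dict Int Int) (r : List Int) (hd : ∀ k ∈ K, d.getD k 0 = 0) :
    ((K.flatMap f).foldl (pvStepA m) (d, r)).2 = r ++ K.flatMap (fun k => (f k).take m.toNat) := by
  induction K generalizing d r with
  | nil => simp
  | cons k K' ih =>
    simp only [List.flatMap_cons, List.foldl_append]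
    obtain ⟨d', hd', hpres⟩ := foldA_block m k (f k) (hf k List.mem_cons_self) d r 0
      (hd k List.mem_cons_self)
    rw [hd']
    have := ih (fun k' hk' => hf k' (List.mem_cons_of_mem _ hk')) (List.nodup_cons.1 hK).2 d'
      (r ++ (f k).take (m - 0).toNat)
      (fun k' hk' => by
        rw [hpres k' (fun e => (List.nodup_cons.1 hK).1 (e ▸ hk'))]
        exact hd k' (List.mem_cons_of_mem _ hk'))
    rw [this, List.append_assoc]
    norm_num

lemma flatMap_perm_of_perm (K : List Int) (f g : Int → List Int)
    (h : ∀ k ∈ K, (f k).Perm (g k)) : (K.flatMap f).Perm (K.flatMap g) := by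
  induction K with
  | nil => simp
  | cons k K' ih =>
    simp only [List.flatMap_cons]
    exact (h k List.mem_cons_self).append
      (ih (fun k' hk' => h k' (List.mem_cons_of_mem _ hk')))

lemma nodup_decadeKeys (numbers : List Int) :
    (PySem.List.sorted (PySem.Set.ofList (numbers.map pvDecade)) (fun k => k) false).Nodup :=
  (PySem.List.sorted_ofList_pairwise_lt _).imp (fun h => ne_of_lt h)

lemma mem_sorted_filter_decade {numbers : List Int} {k x : Int}
    (hx : x ∈ PySem.List.sorted (numbers.filter (fun y => pvDecade y == k)) (fun y => y) false) :
    pvDecade x = k := by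
  rw [PySem.List.mem_sorted] at hx
  exact by simpa using (List.mem_filter.1 hx).2

-- sorted input = concatenation, in ascending decade order, of the sorted per-decade filters
lemma sorted_eq_flatMap (numbers : List Int) :
    PySem.List.sorted numbers (fun x => x) false
      = (PySem.List.sorted (PySem.Set.ofList (numbers.map pvDecade)) (fun k => k) false).flatMap
          (fun k => PySem.List.sorted (numbers.filter (fun x => pvDecade x == k)) (fun x => x) false) := by
  apply PySem.List.sorted_id_eq_of_perm_of_pairwise
  · refine (flatMap_perm_of_perm _ _ _ (fun k _ => PySem.List.sorted_perm _ _ _)).trans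
      (flatMap_filter_perm pvDecade _ numbers (nodup_decadeKeys numbers) ?_)
    intro x hx
    rw [PySem.List.mem_sorted, PySem.Set.mem_ofList]
    exact List.mem_map_of_mem hx
  · rw [List.flatMap_def, List.pairwise_flatten]
    constructor
    · intro l hl
      obtain ⟨k, _, rfl⟩ := List.mem_map.1 hl
      exact PySem.List.sorted_pairwise _ _
    · rw [List.pairwise_map]
      refine (PySem.List.sorted_ofList_pairwise_lt _).imp_of_mem ?_
      intro k k' _ _ hkk' x hx y hy
      have hxk := mem_sorted_filter_decade hx
      have hyk := mem_sorted_filter_decade hy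
      exact le_of_pvDecade_lt (by rw [hxk, hyk]; exact hkk')

-- ===== VERDICT (by name: the statement is the Claim_ definition above) =====
theorem filter_by_decade_spec : Claim_equal_filter_by_decade := by
  unfold Claim_equal_filter_by_decade
  intro numbers m _
  unfold Spec_filter_by_decade filter_by_decade filter_by_decade_alt
  by_cases hm : m ≤ 0
  · rw [if_pos hm, foldA_nonpos m hm _ _ _ (fun k => by rw [PySem.Dict.getD_empty])]
  · rw [if_neg hm]
    have hm' : 0 < m := lt_of_not_ge hm
    have hkeys : (numbers.foldl
        (fun (d : PySem.Dict Int (List Int)) num => d.modify (pvDecade num) [] (· ++ [num]))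
        PySem.Dict.empty).keys = PySem.Set.ofList (numbers.map pvDecade) := by
      rw [PySem.Dict.keys_foldl_modify_key numbers pvDecade [] (fun _ num => (· ++ [num])),
        PySem.Dict.keys_empty, PySem.Set.update_nil_left]
    have hbuck : ∀ k, (numbers.foldl
        (fun (d : PySem.Dict Int (List Int)) num => d.modify (pvDecade num) [] (· ++ [num]))
        PySem.Dict.empty).getD k [] = numbers.filter (fun x => pvDecade x == k) := by
      intro k
      rw [getD_bucketFold, PySem.Dict.getD_empty, List.nil_append]
    simp only [hkeys, hbuck]
    have hslice : ∀ xs : List Int, PySem.List.slice xs none (some m) = xs.take m.toNat := by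
      intro xs
      rw [← PySem.List.slice_to_natCast xs m.toNat, Int.toNat_of_nonneg hm'.le]
    simp only [hslice]
    rw [PySem.List.foldl_append_eq_flatMap, List.nil_append, sorted_eq_flatMap numbers,
      foldA_flatMap m _ _ (fun k _ => fun x hx => mem_sorted_filter_decade hx)
        (nodup_decadeKeys numbers) _ _ (fun k _ => PySem.Dict.getD_empty k 0),
      List.nil_append]
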